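-- pv_equiv track=rewrite | github.com/WalterSilva5/cfit-front | page_generator/page_generator.py | add_imports_to_routes_file
-- ===== SOURCE A (Python) =====
-- def add_imports_to_routes_file(content, module_name, kebab_module_name):
--     new_import = f"import {{ {module_name}Listing, {module_name}Form }} from '@/pages/{kebab_module_name}';\n"
--     lines = content.split('\n')
--     for i, line in enumerate(lines):
--         if '// add_import_routes' in line:
--             lines.insert(i, new_import)
--             break
--
--     return '\n'.join(lines)
-- ===== SOURCE B (Python) =====
-- def add_imports_to_routes_file(content, module_name, kebab_module_name):
--     new_import = f"import {{ {module_name}Listing, {module_name}Form }} from '@/pages/{kebab_module_name}';\n"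
--     idx = content.find('// add_import_routes')
--     if idx == -1:
--         return content
--     line_start = content.rfind('\n', 0, idx) + 1
--     return content[:line_start] + new_import + '\n' + content[line_start:]
-- ===== Notes on version B (the rewrite author's own statement) =====
-- stated objective: alternative
-- what changed: A splits the content into a list of lines, scans it with enumerate to insert the import before the marker line and re-joins; B never builds a line list: it locates the marker with str.find, finds the start of its line with str.rfind('\n', 0, idx), and splices the import in with two string slices.
import Mathlib
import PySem

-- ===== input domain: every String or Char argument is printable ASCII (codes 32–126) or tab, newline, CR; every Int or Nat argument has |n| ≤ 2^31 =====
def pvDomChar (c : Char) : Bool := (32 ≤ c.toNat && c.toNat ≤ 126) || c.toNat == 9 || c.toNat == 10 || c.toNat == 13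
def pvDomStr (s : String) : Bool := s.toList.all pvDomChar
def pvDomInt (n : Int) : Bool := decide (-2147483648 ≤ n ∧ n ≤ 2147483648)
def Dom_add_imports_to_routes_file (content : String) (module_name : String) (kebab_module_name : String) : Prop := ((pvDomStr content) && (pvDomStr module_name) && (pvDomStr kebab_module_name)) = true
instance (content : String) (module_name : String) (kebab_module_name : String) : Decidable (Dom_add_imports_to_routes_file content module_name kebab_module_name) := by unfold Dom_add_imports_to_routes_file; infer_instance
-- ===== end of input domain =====

-- B replaces A's split-into-lines scan/insert/join with direct string index arithmetic
-- (find the marker, rfind the preceding newline, splice); objective: alternative.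

-- ===== PORT A =====
-- A's for-loop with break: scan enumerate(lines); on the first marker line insert at index i and stop
def pvScanInsert (new : String) : List (Int × String) → List String → List String
  | [], lines => lines
  | (i, line) :: rest, lines =>
    if PySem.Str.isIn "// add_import_routes" line then PySem.List.insert lines i new
    else pvScanInsert new rest lines

def pvNewImport (module_name kebab_module_name : String) : String :=
  "import { " ++ module_name ++ "Listing, " ++ module_name ++ "Form } from '@/pages/" ++ kebab_module_name ++ "';\n"

def add_imports_to_routes_file (content : String) (module_name : String) (kebab_module_name : String) : String :=
  let new_import := pvNewImport module_name kebab_module_name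
  let lines := (PySem.Str.split? content "\n").getD []
  PySem.Str.join "\n" (pvScanInsert new_import (PySem.List.enumerate lines) lines)

def add_imports_to_routes_file_alt (content : String) (module_name : String) (kebab_module_name : String) : String :=
  let new_import := pvNewImport module_name kebab_module_name
  let idx := PySem.Str.find content "// add_import_routes"
  if idx = -1 then content
  else
    let line_start := PySem.Str.rfindFrom content "\n" 0 (some idx) + 1
    PySem.Str.slice content none (some line_start) ++ new_import ++ "\n" ++
      PySem.Str.slice content (some line_start) none

-- ===== PRECONDITION & SPEC =====
def Spec_add_imports_to_routes_file (content : String) (module_name : String) (kebab_module_name : String) (out : String) : Prop := out = add_imports_to_routes_file_alt content module_name kebab_module_name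
instance (content : String) (module_name : String) (kebab_module_name : String) (out : String) : Decidable (Spec_add_imports_to_routes_file content module_name kebab_module_name out) := by unfold Spec_add_imports_to_routes_file; infer_instance

-- ===== CLAIM (what is proved, stated in full; the proofs are below) =====
def Claim_equal_add_imports_to_routes_file : Prop := ∀ (content : String) (module_name : String) (kebab_module_name : String), Dom_add_imports_to_routes_file content module_name kebab_module_name → Spec_add_imports_to_routes_file content module_name kebab_module_name (add_imports_to_routes_file content module_name kebab_module_name)

-- ===== LEMMAS AND PROOFS =====

def pvSplitC : List Char → List (List Char)
  | [] => [[]]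
  | a :: t =>
    if a = '\n' then [] :: pvSplitC t
    else
      match pvSplitC t with
      | [] => [[a]]
      | h :: r => (a :: h) :: r

theorem pvSplitC_ne_nil (l : List Char) : pvSplitC l ≠ [] := by
  cases l with
  | nil => simp [pvSplitC]
  | cons a t =>
    simp only [pvSplitC]
    split
    · simp
    · split <;> simp

theorem pvSplitOn_go (l : List Char) : ∀ (fuel : Nat) (cur : List Char) (acc : List (List Char)),
    l.length < fuel →
    PySem.Chars.splitOn.go ['\n'] fuel l cur acc
      = acc.reverse ++ (pvSplitC l).modifyHead (cur.reverse ++ ·) := by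
  induction l with
  | nil =>
    intro fuel cur acc hf
    cases fuel with
    | zero => omega
    | succ f =>
      rw [PySem.Chars.splitOn.go]
      · simp [pvSplitC]
      · omega
  | cons c rest ih =>
    intro fuel cur acc hf
    cases fuel with
    | zero => simp at hf
    | succ f =>
      rw [PySem.Chars.splitOn.go]
      have hpre : (['\n'] : List Char).isPrefixOf (c :: rest) = (c == '\n') := by
        simp [List.isPrefixOf, eq_comm]
      rw [hpre]
      by_cases hc : c = '\n'
      · subst hc
        simp only [beq_self_eq_true, if_true, List.length_cons, List.length_nil,
          Nat.zero_add, List.drop_succ_cons, List.drop_zero] at *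
        rw [ih f [] (cur.reverse :: acc) (by omega)]
        obtain ⟨h, r, hh⟩ : ∃ h r, pvSplitC rest = h :: r := by
          cases hsp : pvSplitC rest with
          | nil => exact absurd hsp (pvSplitC_ne_nil rest)
          | cons h r => exact ⟨h, r, rfl⟩
        simp [pvSplitC, hh]
      · have hcf : (c == '\n') = false := by simp [hc]
        rw [hcf]
        simp only [Bool.false_eq_true, if_false]
        rw [ih f (c :: cur) acc (by simp at hf; omega)]
        obtain ⟨h, r, hh⟩ : ∃ h r, pvSplitC rest = h :: r := by
          cases hsp : pvSplitC rest with
          | nil => exact absurd hsp (pvSplitC_ne_nil rest)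
          | cons h r => exact ⟨h, r, rfl⟩
        simp [pvSplitC, hc, hh]

theorem pvSplitOn_eq (l : List Char) : PySem.Chars.splitOn l ['\n'] = pvSplitC l := by
  rw [PySem.Chars.splitOn, pvSplitOn_go l (l.length + 1) [] [] (by omega)]
  obtain ⟨h, r, hh⟩ : ∃ h r, pvSplitC l = h :: r := by
    cases hsp : pvSplitC l with
    | nil => exact absurd hsp (pvSplitC_ne_nil l)
    | cons h r => exact ⟨h, r, rfl⟩
  simp [hh]

theorem pvJoin_splitC (l : List Char) : PySem.Chars.join ['\n'] (pvSplitC l) = l := by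
  induction l with
  | nil => simp [pvSplitC, PySem.Chars.join_singleton]
  | cons a t ih =>
    obtain ⟨h, r, hh⟩ : ∃ h r, pvSplitC t = h :: r := by
      cases hsp : pvSplitC t with
      | nil => exact absurd hsp (pvSplitC_ne_nil t)
      | cons h r => exact ⟨h, r, rfl⟩
    rw [hh] at ih
    by_cases hc : a = '\n'
    · subst hc
      simp only [pvSplitC, if_true, hh]
      rw [PySem.Chars.join_cons_cons, ih]
      simp
    · simp only [pvSplitC, hc, if_false, hh]
      cases r with
      | nil =>
        rw [PySem.Chars.join_singleton]
        rw [PySem.Chars.join_singleton] at ih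
        rw [ih]
      | cons q r' =>
        rw [PySem.Chars.join_cons_cons]
        rw [PySem.Chars.join_cons_cons] at ih
        rw [← ih]
        simp

theorem pvSplitC_parts (l : List Char) :
    ∀ h r, pvSplitC l = h :: r → (h <+: l ∧ ∀ p ∈ r, p <:+: l) := by
  induction l with
  | nil => intro h r hh; simp [pvSplitC] at hh; simp [hh.1, hh.2]
  | cons a t ih =>
    intro h r hh
    obtain ⟨h', r', hh'⟩ : ∃ h' r', pvSplitC t = h' :: r' := by
      cases hsp : pvSplitC t with
      | nil => exact absurd hsp (pvSplitC_ne_nil t)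
      | cons h' r' => exact ⟨h', r', rfl⟩
    obtain ⟨hpre, hinf⟩ := ih h' r' hh'
    by_cases hc : a = '\n'
    · subst hc
      simp only [pvSplitC, if_true, hh'] at hh
      cases hh
      refine ⟨List.nil_prefix, ?_⟩
      intro p hp
      rcases List.mem_cons.mp hp with hp | hp
      · subst hp
        exact List.infix_cons (List.IsPrefix.isInfix hpre)
      · exact List.infix_cons (hinf p hp)
    · simp only [pvSplitC, hc, if_false, hh'] at hh
      cases hh
      refine ⟨List.cons_prefix_cons.mpr ⟨rfl, hpre⟩, ?_⟩
      intro p hp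
      exact List.infix_cons (hinf p hp)

theorem pvSplitC_infix {p l : List Char} (hp : p ∈ pvSplitC l) : p <:+: l := by
  obtain ⟨h, r, hh⟩ : ∃ h r, pvSplitC l = h :: r := by
    cases hsp : pvSplitC l with
    | nil => exact absurd hsp (pvSplitC_ne_nil l)
    | cons h r => exact ⟨h, r, rfl⟩
  obtain ⟨hpre, hinf⟩ := pvSplitC_parts l h r hh
  rw [hh] at hp
  rcases List.mem_cons.mp hp with hp | hp
  · subst hp; exact List.IsPrefix.isInfix hpre
  · exact hinf p hp

theorem pvSplitC_shape (l : List Char) :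
    ('\n' ∉ l ∧ pvSplitC l = [l]) ∨
    ∃ l0 tl, l = l0 ++ '\n' :: tl ∧ '\n' ∉ l0 ∧ pvSplitC l = l0 :: pvSplitC tl := by
  induction l with
  | nil => left; simp [pvSplitC]
  | cons a t ih =>
    by_cases hc : a = '\n'
    · subst hc
      right
      exact ⟨[], t, by simp, by simp, by simp [pvSplitC]⟩
    · rcases ih with ⟨hnm, hsp⟩ | ⟨l0, tl, heq, hnm, hsp⟩
      · left
        constructor
        · simp only [List.mem_cons, not_or]
          exact ⟨fun h => hc h.symm, hnm⟩
        · simp [pvSplitC, hc, hsp]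
      · right
        refine ⟨a :: l0, tl, by simp [heq], ?_, ?_⟩
        · simp only [List.mem_cons, not_or]
          exact ⟨fun h => hc h.symm, hnm⟩
        have : ∃ h' r', pvSplitC tl = h' :: r' := by
          cases hsp' : pvSplitC tl with
          | nil => exact absurd hsp' (pvSplitC_ne_nil tl)
          | cons h' r' => exact ⟨h', r', rfl⟩
        obtain ⟨h', r', hh'⟩ := this
        simp [pvSplitC, hc, hsp, hh']

def pvInsC (m new : List Char) : List (List Char) → List (List Char)
  | [] => []
  | l :: ls => if PySem.Chars.isIn m l then new :: l :: ls else l :: pvInsC m new ls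

def pvInsS (new : String) : List String → List String
  | [] => []
  | l :: ls => if PySem.Str.isIn "// add_import_routes" l then new :: l :: ls else l :: pvInsS new ls

theorem pvInsert_at {α : Type} (pre suf : List α) (v : α) :
    PySem.List.insert (pre ++ suf) (pre.length : Int) v = pre ++ v :: suf := by
  simp only [PySem.List.insert, PySem.List.sliceIndices]
  norm_num
  rw [if_neg (by omega)]
  have : ((pre.length : Int)).toNat = pre.length := by simp
  rw [this, List.take_append, List.drop_append]
  simp

theorem pvScan_eq_insS (new : String) (lines : List String) : ∀ (pre : List String),
    pvScanInsert new (PySem.List.enumerate lines (pre.length : Int)) (pre ++ lines)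
      = pre ++ pvInsS new lines := by
  induction lines with
  | nil => intro pre; simp [PySem.List.enumerate, pvScanInsert, pvInsS]
  | cons l ls ih =>
    intro pre
    rw [PySem.List.enumerate_cons]
    simp only [pvScanInsert, pvInsS]
    by_cases hm : PySem.Str.isIn "// add_import_routes" l
    · rw [if_pos hm, if_pos hm, pvInsert_at]
    · rw [if_neg hm, if_neg hm]
      have h1 : ((pre.length : Int) + 1) = (((pre ++ [l]).length : Nat) : Int) := by
        simp
      have h2 : pre ++ l :: ls = (pre ++ [l]) ++ ls := by simp
      rw [h1, h2, ih (pre ++ [l])]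
      simp

theorem pvInsS_map (new : String) (lines : List String) :
    (pvInsS new lines).map String.toList
      = pvInsC "// add_import_routes".toList new.toList (lines.map String.toList) := by
  induction lines with
  | nil => simp [pvInsS, pvInsC]
  | cons l ls ih =>
    simp only [pvInsS, pvInsC, List.map_cons, PySem.Str.isIn_eq]
    by_cases hm : PySem.Chars.isIn "// add_import_routes".toList l.toList
    · rw [if_pos hm, if_pos hm]; simp
    · rw [if_neg hm, if_neg hm]; simp [ih]

theorem pvRfind_go_spec (s sub : List Char) (fuel : Nat) :
    (PySem.Chars.rfind.go s sub fuel = -1 ∧ ∀ j : Nat, j ≤ fuel → ¬ sub <+: s.drop j) ∨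
    (∃ j : Nat, PySem.Chars.rfind.go s sub fuel = (j : Int) ∧ j ≤ fuel ∧ sub <+: s.drop j ∧
       ∀ i : Nat, j < i → i ≤ fuel → ¬ sub <+: s.drop i) := by
  induction fuel with
  | zero =>
    rw [PySem.Chars.rfind.go]
    by_cases h : sub.isPrefixOf s
    · right
      refine ⟨0, by rw [if_pos h]; norm_num, le_refl 0, ?_, ?_⟩
      · simpa using List.isPrefixOf_iff_prefix.mp h
      · intro i h1 h2; omega
    · left
      refine ⟨by rw [if_neg h], ?_⟩
      intro j hj
      interval_cases j
      simpa using fun hc => h (List.isPrefixOf_iff_prefix.mpr (by simpa using hc))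
  | succ f ih =>
    rw [PySem.Chars.rfind.go]
    by_cases h : sub.isPrefixOf (s.drop (f + 1))
    · right
      refine ⟨f + 1, by rw [if_pos h], le_refl _, List.isPrefixOf_iff_prefix.mp h, ?_⟩
      intro i h1 h2; omega
    · rw [if_neg h]
      have hnp : ¬ sub <+: s.drop (f + 1) := fun hc => h (List.isPrefixOf_iff_prefix.mpr hc)
      rcases ih with ⟨he, hall⟩ | ⟨j, he, hle, hP, hmax⟩
      · left
        refine ⟨he, ?_⟩
        intro j hj
        rcases Nat.lt_or_ge j (f + 1) with hlt | hge
        · exact hall j (by omega)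
        · have : j = f + 1 := by omega
          subst this; exact hnp
      · right
        refine ⟨j, he, by omega, hP, ?_⟩
        intro i h1 h2
        rcases Nat.lt_or_ge i (f + 1) with hlt | hge
        · exact hmax i h1 (by omega)
        · have : i = f + 1 := by omega
          subst this; exact hnp

theorem pvRfind_eq_of {s sub : List Char} {j : Nat} (hj : j ≤ s.length)
    (hP : sub <+: s.drop j) (hmax : ∀ i : Nat, j < i → i ≤ s.length → ¬ sub <+: s.drop i) :
    PySem.Chars.rfind s sub = (j : Int) := by
  rw [PySem.Chars.rfind]
  rcases pvRfind_go_spec s sub s.length with ⟨_, hall⟩ | ⟨j', he, hle, hP', hmax'⟩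
  · exact absurd hP (hall j hj)
  · rw [he]
    congr 1
    rcases Nat.lt_trichotomy j' j with h | h | h
    · exact absurd hP (hmax' j h hj)
    · exact h
    · exact absurd hP' (hmax j' h hle)

theorem pvRfind_eq_neg_one {s sub : List Char}
    (h : ∀ j : Nat, j ≤ s.length → ¬ sub <+: s.drop j) :
    PySem.Chars.rfind s sub = -1 := by
  rw [PySem.Chars.rfind]
  rcases pvRfind_go_spec s sub s.length with ⟨he, _⟩ | ⟨j, he, hle, hP, _⟩
  · exact he
  · exact absurd hP (h j hle)

theorem pvRfind_ge (s sub : List Char) : -1 ≤ PySem.Chars.rfind s sub := by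
  rw [PySem.Chars.rfind]
  rcases pvRfind_go_spec s sub s.length with ⟨he, _⟩ | ⟨j, he, _, _, _⟩ <;> omega

theorem pvSingleton_prefix_drop {c : Char} {s : List Char} {j : Nat} :
    [c] <+: s.drop j ↔ s[j]? = some c := by
  rw [← List.head?_drop]
  constructor
  · rintro ⟨t, ht⟩
    rw [← ht]; rfl
  · intro h
    cases hd : s.drop j with
    | nil => rw [hd] at h; simp at h
    | cons a t =>
      rw [hd] at h
      simp only [List.head?_cons, Option.some.injEq] at h
      subst h
      exact ⟨t, rfl⟩

theorem pvRfind_not_mem {c : Char} {s : List Char} (h : c ∉ s) :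
    PySem.Chars.rfind s [c] = -1 := by
  apply pvRfind_eq_neg_one
  intro j _ hc
  exact h (List.mem_of_getElem? (pvSingleton_prefix_drop.mp hc))

theorem pvRfind_mem_ne {c : Char} {s : List Char} (h : c ∈ s) :
    PySem.Chars.rfind s [c] ≠ -1 := by
  rw [PySem.Chars.rfind]
  rcases pvRfind_go_spec s [c] s.length with ⟨he, hall⟩ | ⟨j, he, _, _, _⟩
  · obtain ⟨j, hj, hget⟩ := List.mem_iff_getElem.mp h
    exact absurd (pvSingleton_prefix_drop.mpr (by rw [List.getElem?_eq_getElem hj, hget])) (hall j (by omega))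
  · rw [he]; omega

-- index into u ++ '\n' :: w at position u.length + 1 + k
theorem pvIdx_shift {u w : List Char} {c : Char} (k : Nat) :
    (u ++ c :: w)[u.length + 1 + k]? = w[k]? := by
  rw [List.getElem?_append_right (by omega)]
  have : u.length + 1 + k - u.length = k + 1 := by omega
  rw [this, List.getElem?_cons_succ]

theorem pvRfind_append {u w : List Char} (_hu : '\n' ∉ u) :
    PySem.Chars.rfind (u ++ '\n' :: w) ['\n']
      = if PySem.Chars.rfind w ['\n'] = -1 then (u.length : Int)
        else (u.length : Int) + 1 + PySem.Chars.rfind w ['\n'] := by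
  by_cases hw : PySem.Chars.rfind w ['\n'] = -1
  · rw [if_pos hw]
    apply pvRfind_eq_of (by simp)
    · rw [pvSingleton_prefix_drop, List.getElem?_append_right (by omega)]
      simp
    · intro i h1 h2 hc
      rw [pvSingleton_prefix_drop] at hc
      have hi : i = u.length + 1 + (i - u.length - 1) := by omega
      rw [hi, pvIdx_shift] at hc
      have : '\n' ∈ w := List.mem_of_getElem? hc
      exact pvRfind_mem_ne this hw
  · rw [if_neg hw]
    simp only [PySem.Chars.rfind] at hw ⊢
    rcases pvRfind_go_spec w ['\n'] w.length with ⟨he, _⟩ | ⟨j, he, hle, hP, hmax⟩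
    · exact absurd he hw
    · rw [he]
      have goal : PySem.Chars.rfind (u ++ '\n' :: w) ['\n'] = ((u.length + 1 + j : Nat) : Int) := by
        apply pvRfind_eq_of (by simp; omega)
        · rw [pvSingleton_prefix_drop, pvIdx_shift]
          rw [pvSingleton_prefix_drop] at hP
          exact hP
        · intro i h1 h2 hc
          rw [pvSingleton_prefix_drop] at hc
          have hi : i = u.length + 1 + (i - u.length - 1) := by omega
          rw [hi, pvIdx_shift] at hc
          have hle2 : i - u.length - 1 ≤ w.length := by simp at h2; omega
          have := hmax (i - u.length - 1) (by omega) hle2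
          rw [pvSingleton_prefix_drop] at this
          exact this hc
      simp only [PySem.Chars.rfind] at goal
      rw [goal]
      push_cast
      ring

theorem pvRfindFrom_take {s sub : List Char} {f : Int} (h0 : 0 ≤ f) (hf : f ≤ s.length) :
    PySem.Chars.rfindFrom s sub 0 (some f) = PySem.Chars.rfind (s.take f.toNat) sub := by
  rw [PySem.Chars.rfindFrom]
  have e1 : ¬ ((s.length : Int) < f) := by omega
  have e2 : ¬ (f < 0) := by omega
  have e3 : ¬ ((0:Int) < 0) := by omega
  simp only [if_neg e1, if_neg e2, if_neg e3, Int.toNat_zero, List.drop_zero]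
  by_cases hr : PySem.Chars.rfind (List.take f.toNat s) sub = -1
  · rw [if_pos hr, hr]
  · rw [if_neg hr]; omega

theorem pvFind_eq_of {s sub : List Char} {j : Nat}
    (hP : sub <+: s.drop j) (hmin : ∀ i : Nat, i < j → ¬ sub <+: s.drop i) :
    PySem.Chars.find s sub = (j : Int) := by
  have hin : PySem.Chars.isIn sub s = true :=
    (PySem.Chars.exists_prefix_drop_iff_isIn sub s).mp ⟨j, hP⟩
  have hne : PySem.Chars.find s sub ≠ -1 :=
    (PySem.Chars.find_ne_neg_one_iff s sub).mpr ((PySem.Chars.isIn_iff_infix sub s).mp hin)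
  have h0 : 0 ≤ PySem.Chars.find s sub := by
    have := PySem.Chars.neg_one_le_find s sub
    omega
  obtain ⟨hPf, hminf⟩ := PySem.Chars.find_spec h0
  rcases Nat.lt_trichotomy (PySem.Chars.find s sub).toNat j with h | h | h
  · exact absurd hPf (hmin _ h)
  · omega
  · exact absurd hP (hminf j h)

theorem pvPrefix_split {m u w : List Char} (hm : '\n' ∉ m) (h : m <+: u ++ '\n' :: w) :
    m <+: u := by
  rcases Nat.lt_or_ge u.length m.length with hlt | hle
  · exfalso
    obtain ⟨t, ht⟩ := h
    have : (m ++ t)[u.length]? = m[u.length]? := List.getElem?_append_left hlt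
    rw [ht] at this
    rw [List.getElem?_append_right (le_refl _)] at this
    simp only [Nat.sub_self] at this
    have hnl : m[u.length]? = some '\n' := by simpa using this.symm
    exact hm (List.mem_of_getElem? hnl)
  · have heq : m = (u ++ '\n' :: w).take m.length := List.prefix_iff_eq_take.mp h
    rw [List.take_append] at heq
    have h2 : m.length - u.length = 0 := by omega
    rw [h2] at heq
    simp only [List.take_zero, List.append_nil] at heq
    rw [heq]
    exact List.take_prefix _ _

theorem pvDrop_append_le {u w : List Char} {c : Char} {j : Nat} (hj : j ≤ u.length) :
    (u ++ c :: w).drop j = u.drop j ++ c :: w := by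
  rw [List.drop_append]
  have : j - u.length = 0 := by omega
  rw [this, List.drop_zero]

theorem pvDrop_append_gt {u w : List Char} {c : Char} {j : Nat} (hj : u.length < j) :
    (u ++ c :: w).drop j = w.drop (j - u.length - 1) := by
  rw [List.drop_append]
  have h1 : u.drop j = [] := List.drop_eq_nil_of_le (by omega)
  have h2 : j - u.length = (j - u.length - 1) + 1 := by omega
  rw [h1, List.nil_append, h2, List.drop_succ_cons]
  congr 1

theorem pvFind_left {m l0 tl : List Char} (hm : '\n' ∉ m)
    (h : PySem.Chars.isIn m l0 = true) :
    PySem.Chars.find (l0 ++ '\n' :: tl) m = PySem.Chars.find l0 m := by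
  have hne : PySem.Chars.find l0 m ≠ -1 :=
    (PySem.Chars.find_ne_neg_one_iff l0 m).mpr ((PySem.Chars.isIn_iff_infix m l0).mp h)
  have h0 : 0 ≤ PySem.Chars.find l0 m := by
    have := PySem.Chars.neg_one_le_find l0 m; omega
  obtain ⟨hP, hmin⟩ := PySem.Chars.find_spec h0
  have hlen : (PySem.Chars.find l0 m).toNat ≤ l0.length := by
    have := PySem.Chars.find_le_length l0 m; omega
  have : PySem.Chars.find (l0 ++ '\n' :: tl) m = ((PySem.Chars.find l0 m).toNat : Int) := by
    apply pvFind_eq_of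
    · rw [pvDrop_append_le hlen]
      exact hP.trans (List.prefix_append _ _)
    · intro i hi hc
      rw [pvDrop_append_le (by omega)] at hc
      exact hmin i hi (pvPrefix_split hm hc)
  rw [this]; omega

theorem pvFind_right {m l0 tl : List Char} (hm : '\n' ∉ m)
    (h : PySem.Chars.isIn m l0 = false) (h2 : PySem.Chars.isIn m tl = true) :
    PySem.Chars.find (l0 ++ '\n' :: tl) m
      = (l0.length : Int) + 1 + PySem.Chars.find tl m := by
  have hne : PySem.Chars.find tl m ≠ -1 :=
    (PySem.Chars.find_ne_neg_one_iff tl m).mpr ((PySem.Chars.isIn_iff_infix m tl).mp h2)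
  have h0 : 0 ≤ PySem.Chars.find tl m := by
    have := PySem.Chars.neg_one_le_find tl m; omega
  obtain ⟨hP, hmin⟩ := PySem.Chars.find_spec h0
  have : PySem.Chars.find (l0 ++ '\n' :: tl) m
      = ((l0.length + 1 + (PySem.Chars.find tl m).toNat : Nat) : Int) := by
    apply pvFind_eq_of
    · rw [pvDrop_append_gt (by omega)]
      have harith : l0.length + 1 + (PySem.Chars.find tl m).toNat - l0.length - 1
          = (PySem.Chars.find tl m).toNat := by omega
      rw [harith]
      exact hP
    · intro i hi hc
      rcases Nat.lt_or_ge l0.length i with hgt | hle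
      · rw [pvDrop_append_gt hgt] at hc
        exact hmin (i - l0.length - 1) (by omega) hc
      · rw [pvDrop_append_le hle] at hc
        have := pvPrefix_split hm hc
        have hinf : PySem.Chars.isIn m l0 = true :=
          (PySem.Chars.exists_prefix_drop_iff_isIn m l0).mp ⟨i, this⟩
        rw [hinf] at h; exact Bool.true_eq_false.mp h
  rw [this]; push_cast [Int.toNat_of_nonneg h0]; ring

theorem pvIsIn_right {m l0 tl : List Char} (hm : '\n' ∉ m)
    (h : PySem.Chars.isIn m (l0 ++ '\n' :: tl) = true) (h0 : PySem.Chars.isIn m l0 = false) :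
    PySem.Chars.isIn m tl = true := by
  obtain ⟨j, hj⟩ := (PySem.Chars.exists_prefix_drop_iff_isIn m (l0 ++ '\n' :: tl)).mpr h
  rcases Nat.lt_or_ge l0.length j with hgt | hle
  · rw [pvDrop_append_gt hgt] at hj
    exact (PySem.Chars.exists_prefix_drop_iff_isIn m tl).mp ⟨_, hj⟩
  · rw [pvDrop_append_le hle] at hj
    have := pvPrefix_split hm hj
    have hinf : PySem.Chars.isIn m l0 = true :=
      (PySem.Chars.exists_prefix_drop_iff_isIn m l0).mp ⟨j, this⟩
    rw [hinf] at h0; exact absurd h0 (by simp)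

theorem pvTake_append_le {u w : List Char} {c : Char} {j : Nat} (hj : j ≤ u.length) :
    (u ++ c :: w).take j = u.take j := by
  rw [List.take_append]
  have : j - u.length = 0 := by omega
  rw [this]
  simp

theorem pvTake_append_gt {u w : List Char} {c : Char} (k : Nat) :
    (u ++ c :: w).take (u.length + 1 + k) = u ++ c :: w.take k := by
  rw [List.take_append, List.take_of_length_le (by omega)]
  have : u.length + 1 + k - u.length = k + 1 := by omega
  rw [this, List.take_succ_cons]

theorem pvDrop_append_gt' {u w : List Char} {c : Char} (k : Nat) :
    (u ++ c :: w).drop (u.length + 1 + k) = w.drop k := by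
  rw [pvDrop_append_gt (by omega)]
  congr 1
  omega

theorem pvInsC_ne_nil (m new : List Char) {ls : List (List Char)} (h : ls ≠ []) :
    pvInsC m new ls ≠ [] := by
  cases ls with
  | nil => exact absurd rfl h
  | cons l r =>
    simp only [pvInsC]
    split <;> simp

theorem pvInsC_id (m new : List Char) {ls : List (List Char)}
    (h : ∀ l ∈ ls, PySem.Chars.isIn m l = false) : pvInsC m new ls = ls := by
  induction ls with
  | nil => rfl
  | cons l r ih =>
    simp only [pvInsC]
    rw [if_neg (by rw [h l (List.mem_cons_self ..)]; simp), ih (fun p hp => h p (List.mem_cons_of_mem _ hp))]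

def pvBc (m new cs : List Char) : List Char :=
  if PySem.Chars.find cs m = -1 then cs
  else
    cs.take (PySem.Chars.rfind (cs.take (PySem.Chars.find cs m).toNat) ['\n'] + 1).toNat
      ++ new ++ '\n' ::
      cs.drop (PySem.Chars.rfind (cs.take (PySem.Chars.find cs m).toNat) ['\n'] + 1).toNat

theorem pvCore_step (m : List Char) (hm : '\n' ∉ m) (cs : List Char)
    (ih : ∀ tl : List Char, tl.length < cs.length → ∀ new : List Char,
      PySem.Chars.join ['\n'] (pvInsC m new (pvSplitC tl)) = pvBc m new tl)
    (new : List Char) :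
    PySem.Chars.join ['\n'] (pvInsC m new (pvSplitC cs)) = pvBc m new cs := by
  by_cases hin : PySem.Chars.isIn m cs
  case neg =>
    have hinf : PySem.Chars.isIn m cs = false := by simpa using hin
    have hfind : PySem.Chars.find cs m = -1 :=
      (PySem.Chars.find_eq_neg_one_iff cs m).mpr ((PySem.Chars.isIn_eq_false_iff m cs).mp hinf)
    rw [pvBc, if_pos hfind]
    have hall : ∀ p ∈ pvSplitC cs, PySem.Chars.isIn m p = false := by
      intro p hp
      rw [PySem.Chars.isIn_eq_false_iff]
      intro hcon
      exact ((PySem.Chars.isIn_eq_false_iff m cs).mp hinf) (hcon.trans (pvSplitC_infix hp))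
    rw [pvInsC_id m new hall, pvJoin_splitC]
  case pos =>
    have hne : PySem.Chars.find cs m ≠ -1 :=
      (PySem.Chars.find_ne_neg_one_iff cs m).mpr ((PySem.Chars.isIn_iff_infix m cs).mp hin)
    have h0 : 0 ≤ PySem.Chars.find cs m := by
      have := PySem.Chars.neg_one_le_find cs m; omega
    rw [pvBc, if_neg hne]
    rcases pvSplitC_shape cs with ⟨hnl, hsp⟩ | ⟨l0, tl, heq, hnl0, hsp⟩
    · -- single line containing the marker
      rw [hsp]
      simp only [pvInsC]
      rw [if_pos hin, PySem.Chars.join_cons_cons, PySem.Chars.join_singleton]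
      have hrf : PySem.Chars.rfind (cs.take (PySem.Chars.find cs m).toNat) ['\n'] = -1 :=
        pvRfind_not_mem (fun hmem => hnl (List.take_subset _ _ hmem))
      rw [hrf]
      norm_num
    · by_cases h0l : PySem.Chars.isIn m l0
      · -- marker in the first line
        rw [hsp]
        simp only [pvInsC]
        rw [if_pos h0l, PySem.Chars.join_cons_cons]
        have hjoin : PySem.Chars.join ['\n'] (l0 :: pvSplitC tl) = cs := by
          rw [← hsp, pvJoin_splitC]
        rw [hjoin]
        have hfl : PySem.Chars.find cs m = PySem.Chars.find l0 m := by
          rw [heq]; exact pvFind_left hm h0l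
        have h0f : 0 ≤ PySem.Chars.find l0 m := by
          have h1 := PySem.Chars.neg_one_le_find l0 m
          have h2 : PySem.Chars.find l0 m ≠ -1 :=
            (PySem.Chars.find_ne_neg_one_iff l0 m).mpr ((PySem.Chars.isIn_iff_infix m l0).mp h0l)
          omega
        have hlef : (PySem.Chars.find l0 m).toNat ≤ l0.length := by
          have := PySem.Chars.find_le_length l0 m; omega
        have htake : cs.take (PySem.Chars.find cs m).toNat = l0.take (PySem.Chars.find l0 m).toNat := by
          rw [hfl, heq, pvTake_append_le hlef]
        have hrf : PySem.Chars.rfind (cs.take (PySem.Chars.find cs m).toNat) ['\n'] = -1 := by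
          rw [htake]
          exact pvRfind_not_mem (fun hmem => hnl0 (List.take_subset _ _ hmem))
        rw [hrf]
        norm_num
      · -- marker only past the first line
        have hinf : PySem.Chars.isIn m l0 = false := by simpa using h0l
        have h2 : PySem.Chars.isIn m tl = true := by
          apply pvIsIn_right hm _ hinf
          rw [← heq]; exact hin
        have hne' : PySem.Chars.find tl m ≠ -1 :=
          (PySem.Chars.find_ne_neg_one_iff tl m).mpr ((PySem.Chars.isIn_iff_infix m tl).mp h2)
        have h0f' : 0 ≤ PySem.Chars.find tl m := by
          have := PySem.Chars.neg_one_le_find tl m; omega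
        -- A side
        rw [hsp]
        simp only [pvInsC]
        rw [if_neg (by rw [hinf]; simp)]
        obtain ⟨q, qr, hqr⟩ : ∃ q qr, pvInsC m new (pvSplitC tl) = q :: qr := by
          cases hI : pvInsC m new (pvSplitC tl) with
          | nil => exact absurd hI (pvInsC_ne_nil m new (pvSplitC_ne_nil tl))
          | cons q qr => exact ⟨q, qr, rfl⟩
        rw [hqr, PySem.Chars.join_cons_cons, ← hqr]
        have hlt : tl.length < cs.length := by rw [heq]; simp; omega
        rw [ih tl hlt new, pvBc, if_neg hne']
        -- B side
        have hfr : PySem.Chars.find cs m = (l0.length : Int) + 1 + PySem.Chars.find tl m := by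
          rw [heq]; exact pvFind_right hm hinf h2
        have htoN : (PySem.Chars.find cs m).toNat = l0.length + 1 + (PySem.Chars.find tl m).toNat := by
          rw [hfr]; omega
        have htake : cs.take (PySem.Chars.find cs m).toNat
            = l0 ++ '\n' :: tl.take (PySem.Chars.find tl m).toNat := by
          rw [htoN, heq, pvTake_append_gt]
        have hrap := pvRfind_append (u := l0) (w := tl.take (PySem.Chars.find tl m).toNat) hnl0
        rw [htake, hrap]
        have hge := pvRfind_ge (tl.take (PySem.Chars.find tl m).toNat) ['\n']
        by_cases hr : PySem.Chars.rfind (tl.take (PySem.Chars.find tl m).toNat) ['\n'] = -1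
        · rw [if_pos hr, hr]
          have ht1 : ((l0.length : Int) + 1).toNat = l0.length + 1 + 0 := by omega
          have ht0 : ((-1 : Int) + 1).toNat = 0 := by omega
          rw [ht1, ht0, heq, pvTake_append_gt 0, pvDrop_append_gt' 0]
          simp
        · rw [if_neg hr]
          set r' := PySem.Chars.rfind (tl.take (PySem.Chars.find tl m).toNat) ['\n'] with hr'
          have ht1 : ((l0.length : Int) + 1 + r' + 1).toNat = l0.length + 1 + (r' + 1).toNat := by omega
          rw [ht1, heq, pvTake_append_gt ((r' + 1).toNat), pvDrop_append_gt' ((r' + 1).toNat)]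
          simp

theorem pvCore (m : List Char) (hm : '\n' ∉ m) :
    ∀ (n : Nat) (cs : List Char), cs.length ≤ n → ∀ new : List Char,
    PySem.Chars.join ['\n'] (pvInsC m new (pvSplitC cs)) = pvBc m new cs := by
  intro n
  induction n with
  | zero =>
    intro cs hlen new
    apply pvCore_step m hm cs _ new
    intro tl htl new'
    omega
  | succ k ihn =>
    intro cs hlen new
    apply pvCore_step m hm cs _ new
    intro tl htl new'
    exact ihn tl (by omega) new'

theorem pv_main (content module_name kebab_module_name : String) :
    add_imports_to_routes_file content module_name kebab_module_name
      = add_imports_to_routes_file_alt content module_name kebab_module_name := by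
  have hm : '\n' ∉ ("// add_import_routes" : String).toList := by decide
  set cs := content.toList with hcs
  set newS := pvNewImport module_name kebab_module_name with hnew
  -- the split
  obtain ⟨L, hL, hLmap⟩ : ∃ L, PySem.Str.split? content "\n" = some L ∧
      L.map String.toList = pvSplitC cs := by
    have h := PySem.Str.split?_map content "\n"
    have hsep : ("\n" : String).toList = ['\n'] := by decide
    rw [hsep, PySem.Chars.split?] at h
    cases hs : PySem.Str.split? content "\n" with
    | none => rw [hs] at h; simp at h
    | some L =>
      rw [hs] at h
      simp at h
      exact ⟨L, rfl, by rw [h, pvSplitOn_eq]⟩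
  -- A's value, at the char level
  have hA : (add_imports_to_routes_file content module_name kebab_module_name).toList
      = pvBc ("// add_import_routes" : String).toList newS.toList cs := by
    simp only [add_imports_to_routes_file, hL, Option.getD_some, ← hnew]
    have hscan : pvScanInsert newS (PySem.List.enumerate L) L = pvInsS newS L := by
      simpa using pvScan_eq_insS newS L []
    rw [hscan, PySem.Str.toList_join, pvInsS_map]
    have hsep : ("\n" : String).toList = ['\n'] := by decide
    rw [hsep, hLmap]
    exact pvCore _ hm cs.length cs (le_refl _) newS.toList
  -- B's value
  by_cases hF : PySem.Chars.find cs ("// add_import_routes" : String).toList = -1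
  · have hB : add_imports_to_routes_file_alt content module_name kebab_module_name = content := by
      simp only [add_imports_to_routes_file_alt, PySem.Str.find_eq, ← hcs]
      rw [if_pos hF]
    rw [hB]
    have : (add_imports_to_routes_file content module_name kebab_module_name).toList = cs := by
      rw [hA, pvBc, if_pos hF]
    have h2 := congrArg String.ofList this
    simpa [hcs, String.ofList_toList] using h2
  · have h0 : 0 ≤ PySem.Chars.find cs ("// add_import_routes" : String).toList := by
      have := PySem.Chars.neg_one_le_find cs ("// add_import_routes" : String).toList; omega
    have hlen : PySem.Chars.find cs ("// add_import_routes" : String).toList ≤ cs.length :=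
      PySem.Chars.find_le_length _ _
    have hrf : PySem.Str.rfindFrom content "\n" 0
          (some (PySem.Str.find content "// add_import_routes"))
        = PySem.Chars.rfind (cs.take (PySem.Str.find content "// add_import_routes").toNat) ['\n'] := by
      rw [PySem.Str.rfindFrom_eq, PySem.Str.find_eq]
      have hsep : ("\n" : String).toList = ['\n'] := by decide
      rw [hsep, ← hcs]
      exact pvRfindFrom_take h0 hlen
    have hge := pvRfind_ge (cs.take (PySem.Str.find content "// add_import_routes").toNat) ['\n']
    have hB : (add_imports_to_routes_file_alt content module_name kebab_module_name).toList
        = pvBc ("// add_import_routes" : String).toList newS.toList cs := by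
      simp only [add_imports_to_routes_file_alt, ← hnew]
      rw [if_neg (by rw [PySem.Str.find_eq, ← hcs]; exact hF)]
      rw [hrf]
      simp only [String.toList_append, PySem.Str.toList_slice, PySem.Chars.slice_eq_listSlice]
      rw [PySem.List.slice_to _ (by omega), PySem.List.slice_from _ (by omega)]
      rw [pvBc, if_neg hF]
      simp only [PySem.Str.find_eq, ← hcs]
      have hsep : ("\n" : String).toList = ['\n'] := by decide
      rw [hsep]
      simp
    have := hA.trans hB.symm
    have h2 := congrArg String.ofList this
    simpa [String.ofList_toList] using h2

-- ===== VERDICT (by name: the statement is the Claim_ definition above) =====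
theorem add_imports_to_routes_file_spec : Claim_equal_add_imports_to_routes_file := by
  intro content module_name kebab_module_name _
  unfold Spec_add_imports_to_routes_file
  exact pv_main content module_name kebab_module_name
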